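-- pv_equiv track=rewrite | github.com/ZouWang-spider/Dual-GNN | DualHGNN/BaseModel/Embedding_CoreNLP.py | compute_position_distance_matrix
-- ===== SOURCE A (Python) =====
-- def compute_position_distance_matrix(sentence):
--     # 将句子拆分为单词列表
--     words = sentence.split()
--     n = len(words)
--
--     # 初始化位置距离矩阵
--     position_matrix = [[0] * n for _ in range(n)]
--
--     # 计算每对单词的相对位置距离
--     for i in range(n):
--         for j in range(n):
--             position_matrix[i][j] = abs(i - j)
--
--     return position_matrix
-- ===== SOURCE B (Python) =====
-- def compute_position_distance_matrix(sentence):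
--     n = len(sentence.split())
--     matrix = []
--     for i in range(n):
--         matrix.append(list(range(i, 0, -1)) + list(range(0, n - i)))
--     return matrix
-- ===== Notes on version B (the rewrite author's own statement) =====
-- stated objective: simpler
-- what changed: Replaced the preallocated zero matrix plus nested j-loop computing abs(i-j) per cell by building each row directly as the concatenation of two arithmetic ranges (descending left part, ascending right part).
import Mathlib
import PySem

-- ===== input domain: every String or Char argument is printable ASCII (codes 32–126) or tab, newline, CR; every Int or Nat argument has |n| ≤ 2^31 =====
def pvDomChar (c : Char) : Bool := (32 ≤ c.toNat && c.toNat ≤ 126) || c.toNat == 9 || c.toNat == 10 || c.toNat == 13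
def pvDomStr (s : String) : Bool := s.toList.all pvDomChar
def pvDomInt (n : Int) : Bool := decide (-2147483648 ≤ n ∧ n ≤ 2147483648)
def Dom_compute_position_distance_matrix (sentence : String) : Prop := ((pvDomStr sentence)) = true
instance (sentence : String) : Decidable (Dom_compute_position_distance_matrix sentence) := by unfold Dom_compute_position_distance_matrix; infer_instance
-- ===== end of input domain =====

-- B builds each row directly as the concatenation of two arithmetic ranges instead of
-- A's nested loop writing abs(i-j) into every cell of a preallocated zero matrix.

-- ===== PORT A =====
-- position_matrix[i][j] = abs(i-j) is modelled as functional update (set row i to the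
-- row with index j set); both indices come from range(n) so they are always in range,
-- where Python's indexing and Lean's getD/set agree exactly.
def compute_position_distance_matrix (sentence : String) : List (List Int) :=
  let words := PySem.Str.split₀ sentence
  let n := words.length
  let position_matrix := (List.range n).map (fun _ => List.replicate n (0 : Int))
  (PySem.List.pyRange 0 (n : Int) 1).foldl (fun m i =>
    (PySem.List.pyRange 0 (n : Int) 1).foldl (fun m j =>
      m.set i.toNat ((m.getD i.toNat []).set j.toNat |i - j|)) m) position_matrix

-- ===== PORT B =====
def compute_position_distance_matrix_alt (sentence : String) : List (List Int) :=
  let n := (PySem.Str.split₀ sentence).length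
  (PySem.List.pyRange 0 (n : Int) 1).foldl (fun matrix i =>
    matrix ++ [PySem.List.pyRange i 0 (-1) ++ PySem.List.pyRange 0 ((n : Int) - i) 1]) []

-- ===== PRECONDITION & SPEC =====
def Spec_compute_position_distance_matrix (sentence : String) (out : List (List Int)) : Prop := out = compute_position_distance_matrix_alt sentence
instance (sentence : String) (out : List (List Int)) : Decidable (Spec_compute_position_distance_matrix sentence out) := by unfold Spec_compute_position_distance_matrix; infer_instance

-- ===== CLAIM (what is proved, stated in full; the proofs are below) =====
def Claim_equal_compute_position_distance_matrix : Prop := ∀ (sentence : String), Dom_compute_position_distance_matrix sentence → Spec_compute_position_distance_matrix sentence (compute_position_distance_matrix sentence)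

-- ===== LEMMAS AND PROOFS =====

-- Writing g j into slot j for j = 0..k-1 when k ≤ |xs| replaces the prefix by map g.
theorem pv_foldl_set_range {α : Type} (g : Nat → α) :
    ∀ (k : Nat) (xs : List α), k ≤ xs.length →
      (List.range k).foldl (fun r j => r.set j (g j)) xs = (List.range k).map g ++ xs.drop k := by
  intro k
  induction k with
  | zero => intro xs _; simp
  | succ k ih =>
    intro xs hk
    have hklt : k < xs.length := by omega
    rw [List.range_succ, List.foldl_append, List.foldl_cons, List.foldl_nil,
      ih xs (by omega)]
    have hlen : ((List.range k).map g).length = k := by simp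
    rw [List.set_append_right _ _ (by omega)]
    simp only [hlen, Nat.sub_self]
    rw [List.drop_eq_getElem_cons hklt, List.set_cons_zero]
    simp [List.range_succ]

-- A's inner loop rewrites any length-n row into the distance row for index i.
theorem pv_inner (n : Nat) (i : Int) (row : List Int) (hrow : row.length = n) :
    (PySem.List.pyRange 0 (n : Int) 1).foldl (fun r j => r.set j.toNat |i - j|) row
      = (List.range n).map (fun j : Nat => |i - (j : Int)|) := by
  rw [PySem.List.pyRange_one, List.foldl_map]
  simp only [zero_add, Int.sub_zero, Int.toNat_natCast]
  rw [pv_foldl_set_range (fun k => |i - (k : Int)|) n row (by omega),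
    List.drop_eq_nil_of_le (by omega), List.append_nil]

-- Repeatedly mutating row i of the matrix is mutating that one row.
theorem pv_focus (i : Nat) (step : List Int → Int → List Int) :
    ∀ (L : List Int) (m : List (List Int)), i < m.length →
      L.foldl (fun m j => m.set i (step (m.getD i []) j)) m
        = m.set i (L.foldl step (m.getD i [])) := by
  intro L
  induction L with
  | nil =>
    intro m hm
    simp [List.getD_eq_getElem?_getD, List.getElem?_eq_getElem hm, List.set_getElem_self]
  | cons j L ih =>
    intro m hm
    rw [List.foldl_cons, ih _ (by simpa using hm), List.foldl_cons]
    have h1 : (m.set i (step (m.getD i []) j)).getD i [] = step (m.getD i []) j := by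
      simp [List.getD_eq_getElem?_getD, List.getElem?_set_self hm]
    rw [h1, List.set_set]

-- Row i of the distance matrix.
def pvRow (n i : Nat) : List Int := (List.range n).map (fun j : Nat => |(i : Int) - (j : Int)|)

-- A's outer loop, run for i = 0..k-1 on an n×n matrix, replaces the first k rows.
theorem pv_outer (n : Nat) :
    ∀ (k : Nat), k ≤ n → ∀ (m : List (List Int)), m.length = n → (∀ r ∈ m, r.length = n) →
      (List.range k).foldl (fun m (i : Nat) =>
          (PySem.List.pyRange 0 (n : Int) 1).foldl (fun m j =>
            m.set i ((m.getD i []).set j.toNat |(i : Int) - j|)) m) m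
        = (List.range k).map (pvRow n) ++ m.drop k := by
  intro k
  induction k with
  | zero => intro _ m _ _; simp
  | succ k ih =>
    intro hk m hm hr
    have hklt : k < n := by omega
    rw [List.range_succ, List.foldl_append, List.foldl_cons, List.foldl_nil,
      ih (by omega) m hm hr]
    set m' := (List.range k).map (pvRow n) ++ m.drop k with hm'
    have hmlen : m'.length = n := by simp [hm', hm]; omega
    have hkm : k < m'.length := by omega
    have hget : m'.getD k [] = m.getD k [] := by
      simp [hm', List.getD_eq_getElem?_getD, List.getElem?_append_right, List.getElem?_drop]
    have hrowlen : (m'.getD k []).length = n := by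
      rw [hget]
      have : m.getD k [] = m[k] := by
        simp [List.getD_eq_getElem?_getD, List.getElem?_eq_getElem (by omega : k < m.length)]
      rw [this]; exact hr _ (List.getElem_mem _)
    rw [pv_focus k (fun r j => r.set j.toNat |(k : Int) - j|) (PySem.List.pyRange 0 (n : Int) 1) m' hkm,
      hget, pv_inner n (k : Int) _ (hget ▸ hrowlen)]
    have hsetlen : ((List.range k).map (pvRow n)).length = k := by simp
    rw [List.set_append_right _ _ (by omega)]
    simp only [hsetlen, Nat.sub_self]
    have hdk : k < m.length := by omega
    rw [List.drop_eq_getElem_cons hdk, List.set_cons_zero]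
    simp [List.range_succ, pvRow]

-- A fold over range(n) of Ints is a fold over Nats.
theorem pv_pyfold {α : Type} (g : α → Int → α) (init : α) (n : Nat) :
    (PySem.List.pyRange 0 (n : Int) 1).foldl g init
      = (List.range n).foldl (fun a (k : Nat) => g a (k : Int)) init := by
  rw [PySem.List.pyRange_one, List.foldl_map]
  simp

-- A's whole loop nest computes the distance-matrix rows.
theorem pv_a_eq (n : Nat) :
    (PySem.List.pyRange 0 (n : Int) 1).foldl (fun m i =>
      (PySem.List.pyRange 0 (n : Int) 1).foldl (fun m j =>
        m.set i.toNat ((m.getD i.toNat []).set j.toNat |i - j|)) m)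
      ((List.range n).map (fun _ => List.replicate n (0 : Int)))
      = (List.range n).map (pvRow n) := by
  conv_lhs => rw [pv_pyfold]
  have h := pv_outer n n (le_refl n) ((List.range n).map (fun _ => List.replicate n (0 : Int)))
    (by simp) (by intro r hr; simp at hr; obtain ⟨_, _, rfl⟩ := hr; simp)
  rw [List.drop_eq_nil_of_le (by simp), List.append_nil] at h
  simp only [Int.toNat_natCast]
  exact h

-- B's row-append loop computes the same rows.
theorem pv_b_eq (n : Nat) :
    (PySem.List.pyRange 0 (n : Int) 1).foldl (fun matrix i =>
      matrix ++ [PySem.List.pyRange i 0 (-1) ++ PySem.List.pyRange 0 ((n : Int) - i) 1]) []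
      = (List.range n).map (pvRow n) := by
  rw [PySem.List.foldl_append_singleton_eq_map, List.nil_append,
    PySem.List.pyRange_one]
  simp only [Int.sub_zero, Int.toNat_natCast, List.map_map]
  apply List.map_congr_left
  intro k hk
  simp only [Function.comp, zero_add]
  have hkn : k < n := List.mem_range.mp hk
  rw [PySem.List.pyRange_neg_one, PySem.List.pyRange_one]
  simp only [Int.sub_zero, Int.toNat_natCast]
  unfold pvRow
  have hsplit : n = k + (n - k) := by omega
  conv_rhs => rw [hsplit]
  rw [List.range_add, List.map_append]
  congr 1
  · apply List.map_congr_left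
    intro t ht
    have : t < k := List.mem_range.mp ht
    rw [abs_of_nonneg (by push_cast; omega)]
  · have : ((n : Int) - k).toNat = n - k := by omega
    rw [this]
    rw [List.map_map]
    apply List.map_congr_left
    intro t _
    simp only [Function.comp]
    push_cast
    rw [abs_of_nonpos (by omega)]
    ring

-- ===== VERDICT (by name: the statement is the Claim_ definition above) =====
theorem compute_position_distance_matrix_spec : Claim_equal_compute_position_distance_matrix := by
  intro sentence _
  unfold Spec_compute_position_distance_matrix compute_position_distance_matrix
    compute_position_distance_matrix_alt
  rw [pv_a_eq, pv_b_eq]
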